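-- pv_equiv track=rewrite | github.com/sberservice/sbs_helper_telegram_bot | scripts/the_helper.py | parse_index_selection
-- ===== SOURCE A (Python) =====
-- from typing import Dict, List, Optional, Tuple
--
-- def parse_index_selection(raw_value: str, max_index: int) -> List[int]:
--     """
--     Распарсить ввод номеров элементов в формате "1,3-5".
--
--     Args:
--         raw_value: Строка ввода пользователя.
--         max_index: Максимально допустимый индекс (включительно).
--
--     Returns:
--         Отсортированный список уникальных индексов (1-based).
--
--     Raises:
--         ValueError: Если формат ввода некорректный.
--     """
--     value = (raw_value or "").strip()
--     if not value:
--         return []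
--
--     selected: set[int] = set()
--     for chunk in value.split(","):
--         part = chunk.strip()
--         if not part:
--             continue
--
--         if "-" in part:
--             left, right = [x.strip() for x in part.split("-", 1)]
--             if not left.isdigit() or not right.isdigit():
--                 raise ValueError("Диапазон должен содержать только числа")
--             start, end = int(left), int(right)
--             if start > end:
--                 raise ValueError("Начало диапазона не может быть больше конца")
--             for idx in range(start, end + 1):
--                 if idx < 1 or idx > max_index:
--                     raise ValueError(f"Номер {idx} вне допустимого диапазона 1..{max_index}")
--                 selected.add(idx)
--             continue
--
--         if not part.isdigit():
--             raise ValueError("Номера должны быть целыми числами")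
--         idx = int(part)
--         if idx < 1 or idx > max_index:
--             raise ValueError(f"Номер {idx} вне допустимого диапазона 1..{max_index}")
--         selected.add(idx)
--
--     return sorted(selected)
-- ===== SOURCE B (Python) =====
-- def _span_of_chunk(part, max_index):
--     """Validate one non-empty chunk; return it as an inclusive (lo, hi) span."""
--     if "-" in part:
--         left, right = [x.strip() for x in part.split("-", 1)]
--         if not left.isdigit() or not right.isdigit():
--             raise ValueError("Диапазон должен содержать только числа")
--         lo, hi = int(left), int(right)
--         if lo > hi:
--             raise ValueError("Начало диапазона не может быть больше конца")
--     else: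
--         if not part.isdigit():
--             raise ValueError("Номера должны быть целыми числами")
--         lo = hi = int(part)
--     if lo < 1 or hi > max_index:
--         raise ValueError(f"Номер вне допустимого диапазона 1..{max_index}")
--     return lo, hi
--
--
-- def parse_index_selection(raw_value, max_index):
--     value = (raw_value or "").strip()
--     if not value:
--         return []
--     spans = [_span_of_chunk(p.strip(), max_index)
--              for p in value.split(",") if p.strip()]
--     spans.sort(key=lambda span: span[0])
--     result = []
--     last = 0
--     for lo, hi in spans:
--         for idx in range(max(lo, last + 1), hi + 1):
--             result.append(idx)
--         last = max(last, hi)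
--     return result
-- ===== Notes on version B (the rewrite author's own statement) =====
-- stated objective: alternative
-- what changed: B validates each chunk into an inclusive (lo, hi) span via a helper (checking bounds once per span, not once per index), sorts the spans by start, and emits the sorted unique result by a single merge-sweep over the sorted spans with a 'last emitted' cursor, replacing A's per-index set accumulation and final sorted(set(...)) entirely.
import Mathlib
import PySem

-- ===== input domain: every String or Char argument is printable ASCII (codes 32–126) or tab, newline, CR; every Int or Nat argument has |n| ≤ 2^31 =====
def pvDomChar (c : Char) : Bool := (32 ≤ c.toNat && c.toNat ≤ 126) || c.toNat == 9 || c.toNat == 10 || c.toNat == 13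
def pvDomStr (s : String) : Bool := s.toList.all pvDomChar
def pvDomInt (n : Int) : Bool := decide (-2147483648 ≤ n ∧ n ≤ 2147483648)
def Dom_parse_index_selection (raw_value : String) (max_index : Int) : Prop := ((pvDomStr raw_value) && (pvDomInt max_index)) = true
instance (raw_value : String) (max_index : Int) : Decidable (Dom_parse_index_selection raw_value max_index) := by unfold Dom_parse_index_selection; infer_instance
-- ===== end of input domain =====

-- B (port below) replaces A's per-index set accumulation + sorted(set) by span parsing, a sort by
-- span start, and a merge-sweep emission (objective: alternative).

-- ===== PORT A =====
-- Python ValueError = `none`; the `none => []` fallback of the match is unreachable under Pre_.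
def pyA_step (max_index : Int) (acc : Option (PySem.Set Int)) (chunk : List Char) : Option (PySem.Set Int) :=
  acc.bind fun sel =>
    let part := PySem.Chars.strip chunk
    if part = [] then some sel
    else if PySem.Chars.isIn ['-'] part then
      match (PySem.Chars.splitOnMax part ['-'] 1).map PySem.Chars.strip with
      | [left, right] =>
        if PySem.Chars.strIsdigit left && PySem.Chars.strIsdigit right then
          match PySem.Int.ofChars? left, PySem.Int.ofChars? right with
          | some start, some stop =>
            if start > stop then none
            else (PySem.List.pyRange start (stop + 1)).foldl
              (fun a idx => a.bind fun s =>
                if idx < 1 ∨ idx > max_index then none else some (PySem.Set.add s idx))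
              (some sel)
          | _, _ => none
        else none
      | _ => none
    else
      if PySem.Chars.strIsdigit part then
        match PySem.Int.ofChars? part with
        | some idx => if idx < 1 ∨ idx > max_index then none else some (PySem.Set.add sel idx)
        | none => none
      else none

def parse_index_selection (raw_value : String) (max_index : Int) : List Int :=
  let value := PySem.Chars.strip raw_value.toList
  if value = [] then []
  else
    match (PySem.Chars.splitOn value [',']).foldl (pyA_step max_index) (some PySem.Set.empty) with
    | some selected => PySem.List.sorted selected (fun x => x)
    | none => []

-- ===== PORT B =====
-- _span_of_chunk: one non-empty chunk -> inclusive (lo, hi) span; `none` = the Python raise.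
def pyB_span (max_index : Int) (part : List Char) : Option (Int × Int) :=
  (if PySem.Chars.isIn ['-'] part then
    match (PySem.Chars.splitOnMax part ['-'] 1).map PySem.Chars.strip with
    | [left, right] =>
      if !PySem.Chars.strIsdigit left || !PySem.Chars.strIsdigit right then none
      else
        match PySem.Int.ofChars? left, PySem.Int.ofChars? right with
        | some lo, some hi => if lo > hi then none else some (lo, hi)
        | _, _ => none
    | _ => none
  else
    if !PySem.Chars.strIsdigit part then none
    else (PySem.Int.ofChars? part).map (fun n => (n, n))).bind
    (fun span => if span.1 < 1 ∨ span.2 > max_index then none else some span)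

-- the comprehension `[_span_of_chunk(p.strip(), max_index) for p in value.split(",") if p.strip()]`
def pyB_chunks (value : List Char) : List (List Char) :=
  (PySem.Chars.splitOn value [',']).filterMap fun c =>
    let p := PySem.Chars.strip c
    if p = [] then none else some p

def parse_index_selection_alt (raw_value : String) (max_index : Int) : List Int :=
  let value := PySem.Chars.strip raw_value.toList
  if value = [] then []
  else
    match (pyB_chunks value).mapM (pyB_span max_index) with
    | none => []   -- a chunk raised; unreachable under Pre_
    | some parsed =>
      let spans := PySem.List.sorted parsed (fun span => span.1)
      -- the sweep loop: state (result, last), appending range(max(lo, last+1), hi+1)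
      (spans.foldl
        (fun st span =>
          (st.1 ++ PySem.List.pyRange (max span.1 (st.2 + 1)) (span.2 + 1), max st.2 span.2))
        ([], 0)).1

-- ===== PRECONDITION & SPEC =====
-- A chunk is well-formed: blank, a digit-string in 1..max_index, or a digits-digits range l-r with int(l) ≤ int(r) inside 1..max_index.
def chunkOKb (max_index : Int) (chunk : List Char) : Bool :=
  let part := PySem.Chars.strip chunk
  if part = [] then true
  else if PySem.Chars.isIn ['-'] part then
    match (PySem.Chars.splitOnMax part ['-'] 1).map PySem.Chars.strip with
    | [left, right] =>
      PySem.Chars.strIsdigit left && PySem.Chars.strIsdigit right &&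
      (match PySem.Int.ofChars? left, PySem.Int.ofChars? right with
       | some s, some e => decide (s ≤ e) && decide (1 ≤ s) && decide (e ≤ max_index)
       | _, _ => false)
    | _ => false
  else
    PySem.Chars.strIsdigit part &&
    (match PySem.Int.ofChars? part with
     | some n => decide (1 ≤ n) && decide (n ≤ max_index)
     | none => false)

-- Pre_ excludes exactly the inputs on which the Python A raises ValueError (malformed or out-of-range chunks).
def Pre_parse_index_selection (raw_value : String) (max_index : Int) : Prop :=
  let value := PySem.Chars.strip raw_value.toList
  value = [] ∨ (PySem.Chars.splitOn value [',']).all (chunkOKb max_index) = true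
instance (raw_value : String) (max_index : Int) : Decidable (Pre_parse_index_selection raw_value max_index) := by
  unfold Pre_parse_index_selection; infer_instance

def pvWitness_parse_index_selection : String × Int := ("1, 3-5", 10)

def Spec_parse_index_selection (raw_value : String) (max_index : Int) (out : List Int) : Prop := out = parse_index_selection_alt raw_value max_index
instance (raw_value : String) (max_index : Int) (out : List Int) : Decidable (Spec_parse_index_selection raw_value max_index out) := by unfold Spec_parse_index_selection; infer_instance

-- ===== CLAIM (what is proved, stated in full; the proofs are below) =====
def Claim_equal_parse_index_selection : Prop := ∀ (raw_value : String) (max_index : Int), Dom_parse_index_selection raw_value max_index → Pre_parse_index_selection raw_value max_index → Spec_parse_index_selection raw_value max_index (parse_index_selection raw_value max_index)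

-- ===== LEMMAS AND PROOFS =====

-- the sweep loop as a structural recursion (for reasoning); equal to the foldl below
def pvSweep : List (Int × Int) → Int → List Int
  | [], _ => []
  | span :: rest, last =>
      PySem.List.pyRange (max span.1 (last + 1)) (span.2 + 1) ++ pvSweep rest (max last span.2)

theorem pv_foldl_eq_sweep (spans : List (Int × Int)) (res : List Int) (last : Int) :
    (spans.foldl
      (fun st span =>
        (st.1 ++ PySem.List.pyRange (max span.1 (st.2 + 1)) (span.2 + 1), max st.2 span.2))
      (res, last)).1 = res ++ pvSweep spans last := by
  induction spans generalizing res last with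
  | nil => simp [pvSweep]
  | cons s t ih => simp [pvSweep, ih, List.append_assoc]

theorem pv_mem_sweep (spans : List (Int × Int)) (last : Int) (i : Int)
    (hsor : spans.Pairwise (fun a b => a.1 ≤ b.1)) :
    i ∈ pvSweep spans last ↔ last < i ∧ ∃ p ∈ spans, p.1 ≤ i ∧ i ≤ p.2 := by
  induction spans generalizing last with
  | nil => simp [pvSweep]
  | cons s t ih =>
    have hs := (List.pairwise_cons.mp hsor).1
    have ht := (List.pairwise_cons.mp hsor).2
    simp only [pvSweep, List.mem_append, PySem.List.mem_pyRange_one, ih _ ht, List.mem_cons]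
    constructor
    · rintro (⟨h1, h2⟩ | ⟨h1, p, hp, h2, h3⟩)
      · exact ⟨by omega, s, Or.inl rfl, by omega, by omega⟩
      · exact ⟨by omega, p, Or.inr hp, h2, h3⟩
    · rintro ⟨hl, p, hps | hp, h2, h3⟩
      · subst hps
        exact Or.inl ⟨by omega, by omega⟩
      · by_cases hc : i ≤ s.2
        · have h4 := hs p hp
          have h5 : s.1 ≤ i := le_trans h4 h2
          exact Or.inl ⟨by omega, by omega⟩
        · exact Or.inr ⟨by omega, p, hp, h2, h3⟩

theorem pv_pairwise_sweep (spans : List (Int × Int)) (last : Int)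
    (hsor : spans.Pairwise (fun a b => a.1 ≤ b.1)) :
    (pvSweep spans last).Pairwise (· < ·) := by
  induction spans generalizing last with
  | nil => exact List.Pairwise.nil
  | cons s t ih =>
    have hs := (List.pairwise_cons.mp hsor).1
    have ht := (List.pairwise_cons.mp hsor).2
    refine List.pairwise_append.mpr ⟨PySem.List.pairwise_lt_pyRange_one _ _, ih _ ht, ?_⟩
    intro x hx y hy
    rw [PySem.List.mem_pyRange_one] at hx
    rw [pv_mem_sweep t _ y ht] at hy
    omega

-- A-side helpers
theorem pv_nodup_foldl_add (l : List Int) (s : PySem.Set Int) (h : s.Nodup) :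
    (l.foldl (fun s idx => PySem.Set.add s idx) s).Nodup := by
  induction l generalizing s with
  | nil => exact h
  | cons x t ih => exact ih _ (PySem.Set.nodup_add s x h)

theorem pv_fold_range_some (max_index : Int) (l : List Int) (s : PySem.Set Int)
    (h : ∀ idx ∈ l, ¬(idx < 1 ∨ idx > max_index)) :
    l.foldl (fun a idx => a.bind fun s =>
        if idx < 1 ∨ idx > max_index then none else some (PySem.Set.add s idx)) (some s)
      = some (l.foldl (fun s idx => PySem.Set.add s idx) s) := by
  induction l generalizing s with
  | nil => rfl
  | cons x t ih =>
    have hx := h x (List.mem_cons_self)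
    simp only [List.foldl_cons, Option.bind_some, if_neg hx]
    exact ih _ (fun idx hidx => h idx (List.mem_cons_of_mem _ hidx))

theorem pv_mem_foldl_add (l : List Int) (s : PySem.Set Int) (y : Int) :
    y ∈ l.foldl (fun s idx => PySem.Set.add s idx) s ↔ y ∈ s ∨ y ∈ l := by
  induction l generalizing s with
  | nil => simp
  | cons x t ih =>
    simp only [List.foldl_cons, ih, PySem.Set.mem_add, List.mem_cons]
    tauto

-- combined induction: A's fold succeeds with a set sel', B's span parsing succeeds with a list ps,
-- sel' is nodup, every span starts at ≥ 1, and sel' = old sel ∪ union of ps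
theorem pv_fold_both (max_index : Int) (chunks : List (List Char))
    (hok : ∀ c ∈ chunks, chunkOKb max_index c = true) :
    ∀ sel : PySem.Set Int, sel.Nodup →
    ∃ sel' ps, chunks.foldl (pyA_step max_index) (some sel) = some sel' ∧
      (chunks.filterMap (fun c =>
        let p := PySem.Chars.strip c
        if p = [] then none else some p)).mapM (pyB_span max_index) = some ps ∧
      sel'.Nodup ∧ (∀ p ∈ ps, 1 ≤ p.1) ∧
      (∀ i : Int, i ∈ sel' ↔ i ∈ sel ∨ ∃ p ∈ ps, p.1 ≤ i ∧ i ≤ p.2) := by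
  induction chunks with
  | nil => exact fun sel hnd => ⟨sel, [], rfl, rfl, hnd, by simp, by simp⟩
  | cons c t ih =>
    intro sel hnd
    have hokc := hok c List.mem_cons_self
    have hokt := fun c' hc' => hok c' (List.mem_cons_of_mem _ hc')
    unfold chunkOKb at hokc
    by_cases hp : PySem.Chars.strip c = []
    · obtain ⟨sel', ps, hA, hB, h1, h2, h3⟩ := ih hokt sel hnd
      refine ⟨sel', ps, ?_, ?_, h1, h2, h3⟩
      · simpa [List.foldl_cons, pyA_step, hp] using hA
      · simpa [List.filterMap_cons, hp] using hB
    · simp only [if_neg hp] at hokc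
      by_cases hd : PySem.Chars.isIn ['-'] (PySem.Chars.strip c) = true
      · simp only [hd, if_true] at hokc
        rcases hm : (PySem.Chars.splitOnMax (PySem.Chars.strip c) ['-'] 1).map PySem.Chars.strip with
          _ | ⟨l, rest⟩
        · rw [hm] at hokc; simp at hokc
        · rcases rest with _ | ⟨r, rest2⟩
          · rw [hm] at hokc; simp at hokc
          · rcases rest2 with _ | ⟨z, rest3⟩
            · rw [hm] at hokc
              rcases hl : PySem.Int.ofChars? l with _ | s0
              · simp [hl] at hokc
              · rcases hr : PySem.Int.ofChars? r with _ | e0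
                · simp [hl, hr] at hokc
                · simp only [hl, hr, Bool.and_eq_true, decide_eq_true_eq] at hokc
                  obtain ⟨⟨hdl, hdr⟩, ⟨hse, hs1⟩, hem⟩ := hokc
                  -- A's step on this chunk
                  have hAstep : pyA_step max_index (some sel) c
                      = some ((PySem.List.pyRange s0 (e0 + 1)).foldl
                          (fun s idx => PySem.Set.add s idx) sel) := by
                    unfold pyA_step
                    simp only [Option.bind_some, if_neg hp, hd, if_true, hm, hdl, hdr,
                      Bool.and_self, if_true, hl, hr]
                    rw [if_neg (by omega : ¬ s0 > e0)]
                    exact pv_fold_range_some max_index _ sel (by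
                      intro idx hidx
                      rw [PySem.List.mem_pyRange_one] at hidx
                      omega)
                  -- B's span on this chunk
                  have hBspan : pyB_span max_index (PySem.Chars.strip c) = some (s0, e0) := by
                    unfold pyB_span
                    simp only [hd, if_true, hm, hdl, hdr, Bool.not_true, Bool.or_self, hl, hr]
                    rw [if_neg (by omega : ¬ s0 > e0)]
                    have hno : ¬ ((s0, e0).1 < 1 ∨ (s0, e0).2 > max_index) := by simp; omega
                    simp only [Bool.false_eq_true, if_false, Option.bind_some, if_neg hno]
                  obtain ⟨sel', ps, hA, hB, h1, h2, h3⟩ :=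
                    ih hokt _ (pv_nodup_foldl_add _ _ hnd)
                  refine ⟨sel', (s0, e0) :: ps, ?_, ?_, h1, ?_, ?_⟩
                  · rw [List.foldl_cons, hAstep]; exact hA
                  · simp only [List.filterMap_cons, if_neg hp, List.mapM_cons, hBspan, hB]
                    rfl
                  · intro p hp'
                    rcases List.mem_cons.mp hp' with rfl | hp''
                    · exact hs1
                    · exact h2 p hp''
                  · intro i
                    rw [h3 i, pv_mem_foldl_add]
                    simp only [PySem.List.mem_pyRange_one, List.mem_cons]
                    constructor
                    · rintro ((hin | ⟨hb1, hb2⟩) | ⟨p, hp', hle⟩)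
                      · exact Or.inl hin
                      · exact Or.inr ⟨(s0, e0), Or.inl rfl, hb1, show i ≤ e0 by omega⟩
                      · exact Or.inr ⟨p, Or.inr hp', hle⟩
                    · rintro (hin | ⟨p, hps, hle⟩)
                      · exact Or.inl (Or.inl hin)
                      · rcases hps with rfl | hp'
                        · have h4 : s0 ≤ i := hle.1
                          have h5 : i ≤ e0 := hle.2
                          exact Or.inl (Or.inr ⟨h4, by omega⟩)
                        · exact Or.inr ⟨p, hp', hle⟩
            · rw [hm] at hokc; simp at hokc
      · simp only [Bool.not_eq_true] at hd
        simp only [hd, Bool.false_eq_true, if_false] at hokc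
        rcases hn : PySem.Int.ofChars? (PySem.Chars.strip c) with _ | n
        · simp [hn] at hokc
        · simp only [hn, Bool.and_eq_true, decide_eq_true_eq] at hokc
          obtain ⟨hdg, h1b, h2b⟩ := hokc
          have hAstep : pyA_step max_index (some sel) c = some (PySem.Set.add sel n) := by
            unfold pyA_step
            simp only [Option.bind_some, if_neg hp, hd, Bool.false_eq_true, if_false, hdg,
              if_true, hn]
            rw [if_neg (by omega : ¬ (n < 1 ∨ n > max_index))]
          have hBspan : pyB_span max_index (PySem.Chars.strip c) = some (n, n) := by
            unfold pyB_span
            simp only [hd, Bool.false_eq_true, if_false, hdg, Bool.not_true, if_false, hn,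
              Option.map_some, Option.bind_some]
            rw [if_neg (by omega : ¬ ((n, n).1 < 1 ∨ (n, n).2 > max_index))]
          obtain ⟨sel', ps, hA, hB, h1, h2, h3⟩ :=
            ih hokt _ (PySem.Set.nodup_add sel n hnd)
          refine ⟨sel', (n, n) :: ps, ?_, ?_, h1, ?_, ?_⟩
          · rw [List.foldl_cons, hAstep]; exact hA
          · simp only [List.filterMap_cons, if_neg hp, List.mapM_cons, hBspan, hB]
            rfl
          · intro p hp'
            rcases List.mem_cons.mp hp' with rfl | hp''
            · exact h1b
            · exact h2 p hp''
          · intro i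
            rw [h3 i, PySem.Set.mem_add]
            simp only [List.mem_cons]
            constructor
            · rintro ((hin | hni) | ⟨p, hp', hle⟩)
              · exact Or.inl hin
              · exact Or.inr ⟨(n, n), Or.inl rfl, show n ≤ i by omega, show i ≤ n by omega⟩
              · exact Or.inr ⟨p, Or.inr hp', hle⟩
            · rintro (hin | ⟨p, hps, hle⟩)
              · exact Or.inl (Or.inl hin)
              · rcases hps with rfl | hp'
                · have h4 : n ≤ i := hle.1
                  have h5 : i ≤ n := hle.2
                  exact Or.inl (Or.inr (by omega))
                · exact Or.inr ⟨p, hp', hle⟩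

-- final: A's sorted set equals B's sweep over the sorted spans
theorem pv_final (parsed : List (Int × Int)) (sel : PySem.Set Int)
    (hnd : sel.Nodup) (hlo : ∀ p ∈ parsed, 1 ≤ p.1)
    (hmem : ∀ i : Int, i ∈ sel ↔ ∃ p ∈ parsed, p.1 ≤ i ∧ i ≤ p.2) :
    PySem.List.sorted sel (fun x => x) =
      pvSweep (PySem.List.sorted parsed (fun span => span.1)) 0 := by
  have hsor : (PySem.List.sorted parsed (fun span => span.1)).Pairwise
      (fun a b => a.1 ≤ b.1) := PySem.List.sorted_pairwise _ _
  have hperm : (PySem.List.sorted parsed (fun span => span.1)).Perm parsed :=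
    PySem.List.sorted_perm _ _ _
  apply PySem.List.sorted_eq_of_perm_of_pairwise_lt
  · rw [List.perm_ext_iff_of_nodup ((pv_pairwise_sweep _ 0 hsor).nodup) hnd]
    intro a
    rw [pv_mem_sweep _ _ _ hsor, hmem a]
    constructor
    · rintro ⟨_, p, hp, hle⟩
      exact ⟨p, hperm.mem_iff.mp hp, hle⟩
    · rintro ⟨p, hp, hle⟩
      have := hlo p hp
      exact ⟨by omega, p, hperm.mem_iff.mpr hp, hle⟩
  · exact pv_pairwise_sweep _ 0 hsor

-- ===== VERDICT (by name: the statement is the Claim_ definition above) =====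
theorem parse_index_selection_spec : Claim_equal_parse_index_selection := by
  intro raw_value max_index _hdom hpre
  unfold Spec_parse_index_selection parse_index_selection parse_index_selection_alt pyB_chunks
  by_cases hv : PySem.Chars.strip raw_value.toList = []
  · simp [hv]
  · simp only [if_neg hv]
    have hall : ∀ c ∈ PySem.Chars.splitOn (PySem.Chars.strip raw_value.toList) [','],
        chunkOKb max_index c = true := by
      rcases hpre with h | h
      · exact absurd h hv
      · exact List.all_eq_true.mp h
    obtain ⟨sel', ps, hA, hB, hnd, hlo, hmem⟩ :=
      pv_fold_both max_index _ hall PySem.Set.empty (by simp [PySem.Set.empty])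
    rw [hA, hB]
    have hfin := pv_final ps sel' hnd hlo
      (fun i => by rw [hmem i]; simp [PySem.Set.empty])
    simpa [pv_foldl_eq_sweep] using hfin
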